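-- pv_equiv track=rewrite | github.com/xyb1996/leetcode- | 动态规划集合/满减问题.py | solution
-- ===== SOURCE A (Python) =====
-- def solution(arr, N, X):
-- 	dp = [[0 for i in range(X + 1)] for i in range(N)]
--
-- 	##设定dp的初始值
-- 	for i in range(1, X + 1):
-- 		if arr[0] >= i:
-- 			dp[0][i] = arr[0]
-- 		else:
-- 			#否则最小金额设置无穷大
-- 			dp[0][i] = 10001
--
-- 	for i in range(1, N):
-- 		for j in range(1, X + 1):
-- 			#如果第i个菜的价值>=j，那么肯定只需要arr[j]或者dp[i-1][j]的值了，就是说可以要么只选i这个菜，要么从从i-1个菜中选出价值>=j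
-- 			#菜，不可能同时选前i-1个菜以及同时选这个菜的
-- 			if arr[i] >= j:
-- 				dp[i][j] = min(arr[i], dp[i - 1][j])
-- 			#否则就可以选这个菜，dp[i - 1][j - arr[i]] + arr[i]，或者dp[i-1][j]
-- 			else:
-- 				dp[i][j] = min(dp[i - 1][j], dp[i - 1][j - arr[i]] + arr[i])
-- 	return dp[N - 1][X]
-- ===== SOURCE B (Python) =====
-- def solution(arr, N, X):
--     memo = {}
--
--     def f(i, j):
--         if j <= 0:
--             return 0
--         if (i, j) in memo:
--             return memo[(i, j)]
--         if i == 0: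
--             v = arr[0] if arr[0] >= j else 10001
--         elif arr[i] >= j:
--             v = min(arr[i], f(i - 1, j))
--         else:
--             v = min(f(i - 1, j), f(i - 1, j - arr[i]) + arr[i])
--         memo[(i, j)] = v
--         return v
--
--     return f(N - 1, X)
-- ===== Notes on version B (the rewrite author's own statement) =====
-- stated objective: alternative
-- what changed: Replaces the bottom-up 2D DP table with a top-down memoized recursion f(i,j) that computes only the (i,j) states actually reachable from (N-1,X).
import Mathlib
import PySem

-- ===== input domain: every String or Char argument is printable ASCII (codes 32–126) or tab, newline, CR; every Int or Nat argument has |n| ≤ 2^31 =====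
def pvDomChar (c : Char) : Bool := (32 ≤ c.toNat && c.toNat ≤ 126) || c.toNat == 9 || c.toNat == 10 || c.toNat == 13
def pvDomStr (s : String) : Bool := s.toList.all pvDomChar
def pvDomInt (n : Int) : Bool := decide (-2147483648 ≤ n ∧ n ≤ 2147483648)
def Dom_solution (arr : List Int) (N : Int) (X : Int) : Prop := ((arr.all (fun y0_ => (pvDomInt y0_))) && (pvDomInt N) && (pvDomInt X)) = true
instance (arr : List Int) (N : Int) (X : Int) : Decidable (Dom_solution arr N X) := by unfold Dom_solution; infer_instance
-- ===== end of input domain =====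

-- B replaces A's bottom-up 2D DP table with a top-down memoized recursion over the same
-- recurrence (alternative decomposition, not claimed faster). Equality is about return values.

-- ===== PORT A =====
-- bottom-up table: dp[0] initialised, then each row i computed from row i-1, return dp[N-1][X]
-- loop body of 'for i in range(1, N)': compute row i from row i-1 and store it
def solStep (arr : List Int) (X : Int) (dp : List (List Int)) (i : Int) : List (List Int) :=
  let ai := (PySem.List.pyGet? arr i).getD 0
  let prev := (PySem.List.pyGet? dp (i - 1)).getD []
  let rowi : List Int := (PySem.List.pyRange 0 (X + 1) 1).map (fun j =>
    if j = 0 then 0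
    else if ai ≥ j then min ai ((PySem.List.pyGet? prev j).getD 0)
    else min ((PySem.List.pyGet? prev j).getD 0)
             ((PySem.List.pyGet? prev (j - ai)).getD 0 + ai))
  -- dp[i] = rowi; i ≥ 1 from the range, so .toNat is exact here
  dp.set i.toNat rowi

def solution (arr : List Int) (N : Int) (X : Int) : Int :=
  -- dp = [[0]*(X+1) for _ in range(N)]
  let zrow : List Int := (PySem.List.pyRange 0 (X + 1) 1).map (fun _ => 0)
  let dp0 : List (List Int) := (PySem.List.pyRange 0 N 1).map (fun _ => zrow)
  -- init loop 'for i in range(1, X+1): dp[0][i] = ...' writes each entry once; entry 0 stays 0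
  let a0 := (PySem.List.pyGet? arr 0).getD 0   -- getD: index error excluded by Pre_
  let row0 : List Int := (PySem.List.pyRange 0 (X + 1) 1).map
      (fun i => if i = 0 then 0 else if a0 ≥ i then a0 else 10001)
  let dp1 := dp0.set 0 row0
  let dp2 := (PySem.List.pyRange 1 N 1).foldl (solStep arr X) dp1
  (PySem.List.pyGet? ((PySem.List.pyGet? dp2 (N - 1)).getD []) X).getD 0

-- ===== PORT B =====
-- memoized recursion f(i, j) with memo threaded through; i is the Python index, which is a
-- nonnegative int on every input Pre_ admits, carried as a Nat (recursion is structural on it)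
def solAltF (arr : List Int) : Nat → Int → PySem.Dict (Nat × Int) Int →
    Int × PySem.Dict (Nat × Int) Int
  | i, j, m =>
    if j ≤ 0 then (0, m)
    else
      match m.get? (i, j) with
      | some v => (v, m)
      | none =>
        match i with
        | 0 =>
          let a0 := (PySem.List.pyGet? arr 0).getD 0   -- getD: index error excluded by Pre_
          let v := if a0 ≥ j then a0 else 10001
          (v, m.insert (0, j) v)
        | i' + 1 =>
          let ai := (PySem.List.pyGet? arr ((i' : Int) + 1)).getD 0
          if ai ≥ j then
            let r := solAltF arr i' j m
            let v := min ai r.1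
            (v, r.2.insert (i' + 1, j) v)
          else
            let r1 := solAltF arr i' j m
            let r2 := solAltF arr i' (j - ai) r1.2
            let v := min r1.1 (r2.1 + ai)
            (v, r2.2.insert (i' + 1, j) v)

def solution_alt (arr : List Int) (N : Int) (X : Int) : Int :=
  (solAltF arr (N - 1).toNat X PySem.Dict.empty).1

-- ===== PRECONDITION & SPEC =====
-- Pre_ excludes exactly the inputs where Python A raises IndexError: N < 1 or X < 0
-- (dp[N-1][X] out of range), and when X ≥ 1 also N > len(arr) (arr[i] out of range) or a
-- negative item among arr[1..N-1] (index j - arr[i] overruns the row).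
def Pre_solution (arr : List Int) (N : Int) (X : Int) : Prop :=
  1 ≤ N ∧ 0 ≤ X ∧ (1 ≤ X → (N ≤ (arr.length : Int) ∧ ∀ a ∈ (arr.take N.toNat).drop 1, 0 ≤ a))
instance (arr : List Int) (N : Int) (X : Int) : Decidable (Pre_solution arr N X) := by
  unfold Pre_solution; infer_instance
def pvWitness_solution : List Int × Int × Int := ([3, 5, 2], 3, 6)
def Spec_solution (arr : List Int) (N : Int) (X : Int) (out : Int) : Prop := out = solution_alt arr N X
instance (arr : List Int) (N : Int) (X : Int) (out : Int) : Decidable (Spec_solution arr N X out) := by unfold Spec_solution; infer_instance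

-- ===== CLAIM (what is proved, stated in full; the proofs are below) =====
def Claim_equal_solution : Prop := ∀ (arr : List Int) (N : Int) (X : Int), Dom_solution arr N X → Pre_solution arr N X → Spec_solution arr N X (solution arr N X)

-- ===== LEMMAS AND PROOFS =====

-- the common recurrence both programs compute
def gSpec (arr : List Int) : Nat → Int → Int
  | 0, j =>
    if j ≤ 0 then 0
    else
      let a0 := (PySem.List.pyGet? arr 0).getD 0
      if a0 ≥ j then a0 else 10001
  | i + 1, j =>
    if j ≤ 0 then 0
    else
      let ai := (PySem.List.pyGet? arr ((i : Int) + 1)).getD 0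
      if ai ≥ j then min ai (gSpec arr i j)
      else min (gSpec arr i j) (gSpec arr i (j - ai) + ai)

-- row i of the table, as values of the recurrence
def rowG (arr : List Int) (X : Int) (i : Nat) : List Int :=
  (PySem.List.pyRange 0 (X + 1) 1).map (fun j => gSpec arr i j)

-- memo invariant: every cached value is the recurrence's value
def MemoOK (arr : List Int) (m : PySem.Dict (Nat × Int) Int) : Prop :=
  ∀ i j v, m.get? (i, j) = some v → v = gSpec arr i j

lemma map_pyRange_get (f : Int → Int) (X j : Int) (h0 : 0 ≤ j) (h1 : j ≤ X) :
    (PySem.List.pyGet? ((PySem.List.pyRange 0 (X + 1) 1).map f) j).getD 0 = f j := by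
  rw [PySem.List.pyGet?_of_nonneg _ h0]
  have hX : X + 1 = (((X + 1).toNat : Nat) : Int) := by omega
  rw [hX, PySem.List.getElem?_map_pyRange_zero f _ j.toNat (by omega)]
  simp [Int.toNat_of_nonneg h0]

lemma rowG_get (arr : List Int) (X : Int) (i : Nat) (j : Int) (h0 : 0 ≤ j) (h1 : j ≤ X) :
    (PySem.List.pyGet? (rowG arr X i) j).getD 0 = gSpec arr i j := by
  rw [rowG, map_pyRange_get _ _ _ h0 h1]
lemma gSpec_zero (arr : List Int) (i : Nat) : gSpec arr i 0 = 0 := by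
  cases i <;> simp [gSpec]

lemma row_step (arr : List Int) (X : Int) (k : Nat) (hX : 0 ≤ X)
    (hai : 1 ≤ X → 0 ≤ (PySem.List.pyGet? arr ((k : Int) + 1)).getD 0) :
    ((PySem.List.pyRange 0 (X + 1) 1).map (fun j =>
      if j = 0 then 0
      else if (PySem.List.pyGet? arr ((k : Int) + 1)).getD 0 ≥ j then
        min ((PySem.List.pyGet? arr ((k : Int) + 1)).getD 0)
            ((PySem.List.pyGet? (rowG arr X k) j).getD 0)
      else
        min ((PySem.List.pyGet? (rowG arr X k) j).getD 0)
            ((PySem.List.pyGet? (rowG arr X k)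
                (j - (PySem.List.pyGet? arr ((k : Int) + 1)).getD 0)).getD 0 +
              (PySem.List.pyGet? arr ((k : Int) + 1)).getD 0))) = rowG arr X (k + 1) := by
  rw [rowG]
  apply List.map_congr_left
  intro j hj
  obtain ⟨hj0, hj1⟩ := PySem.List.mem_pyRange_one.mp hj
  set ai := (PySem.List.pyGet? arr ((k : Int) + 1)).getD 0 with hai_def
  by_cases h0 : j = 0
  · subst h0; simp [gSpec_zero]
  · have hj2 : 1 ≤ j := by omega
    have hXj : j ≤ X := by omega
    rw [if_neg h0]
    show _ = gSpec arr (k + 1) j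
    rw [gSpec]
    rw [if_neg (by omega : ¬ j ≤ 0)]
    by_cases hge : ai ≥ j
    · rw [if_pos hge, if_pos hge,
        map_pyRange_get (fun j => gSpec arr k j) X j (by omega) hXj]
    · rw [if_neg hge, if_neg hge,
        map_pyRange_get (fun j => gSpec arr k j) X j (by omega) hXj,
        map_pyRange_get (fun j => gSpec arr k j) X (j - ai)
          (by have := hai (by omega); omega) (by have := hai (by omega); omega)]
lemma memoOK_insert_g (arr : List Int) (m : PySem.Dict (Nat × Int) Int) (i : Nat) (j : Int)
    (hm : MemoOK arr m) : MemoOK arr (m.insert (i, j) (gSpec arr i j)) := by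
  intro i' j' v hv
  rw [PySem.Dict.get?_insert] at hv
  split at hv
  · next heq => obtain ⟨h1, h2⟩ := Prod.mk.injEq .. ▸ heq; cases hv; cases h1; cases h2; rfl
  · exact hm i' j' v hv

lemma solAltF_correct (arr : List Int) (i : Nat) :
    ∀ (j : Int) (m : PySem.Dict (Nat × Int) Int), MemoOK arr m →
      (solAltF arr i j m).1 = gSpec arr i j ∧ MemoOK arr (solAltF arr i j m).2 := by
  induction i with
  | zero =>
    intro j m hm
    rw [solAltF]
    by_cases hj : j ≤ 0
    · rw [if_pos hj]
      refine ⟨?_, hm⟩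
      rw [gSpec, if_pos hj]
    · rw [if_neg hj]
      cases hv : m.get? (0, j) with
      | some v =>
        dsimp only
        exact ⟨hm 0 j v hv, hm⟩
      | none =>
        dsimp only
        constructor
        · rw [gSpec, if_neg hj]
        · have : (if (PySem.List.pyGet? arr 0).getD 0 ≥ j then (PySem.List.pyGet? arr 0).getD 0 else 10001) = gSpec arr 0 j := by
            rw [gSpec, if_neg hj]
          rw [this]
          exact memoOK_insert_g arr m 0 j hm
  | succ i' ih =>
    intro j m hm
    rw [solAltF]
    by_cases hj : j ≤ 0
    · rw [if_pos hj]
      refine ⟨?_, hm⟩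
      rw [gSpec, if_pos hj]
    · rw [if_neg hj]
      cases hv : m.get? (i' + 1, j) with
      | some v => dsimp only; exact ⟨hm _ j v hv, hm⟩
      | none =>
        dsimp only
        set ai := (PySem.List.pyGet? arr ((i' : Int) + 1)).getD 0 with hai
        by_cases hge : ai ≥ j
        · rw [if_pos hge]
          obtain ⟨h1, h2⟩ := ih j m hm
          have hv : min ai (solAltF arr i' j m).1 = gSpec arr (i' + 1) j := by
            rw [h1, gSpec, if_neg hj, ← hai, if_pos hge]
          exact ⟨hv, hv ▸ memoOK_insert_g arr _ (i' + 1) j h2⟩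
        · rw [if_neg hge]
          obtain ⟨h1, h2⟩ := ih j m hm
          obtain ⟨h3, h4⟩ := ih (j - ai) _ h2
          have hv : min (solAltF arr i' j m).1 ((solAltF arr i' (j - ai) (solAltF arr i' j m).2).1 + ai) = gSpec arr (i' + 1) j := by
            rw [h1, h3, gSpec, if_neg hj, ← hai, if_neg hge]
          exact ⟨hv, hv ▸ memoOK_insert_g arr _ (i' + 1) j h4⟩

lemma solution_alt_eq_gSpec (arr : List Int) (N : Int) (X : Int) :
    solution_alt arr N X = gSpec arr (N - 1).toNat X := by
  rw [solution_alt]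
  exact (solAltF_correct arr (N - 1).toNat X PySem.Dict.empty (by intro i j v h; simp [PySem.Dict.get?_empty] at h)).1
lemma row0_eq (arr : List Int) (X : Int) :
    ((PySem.List.pyRange 0 (X + 1) 1).map
      (fun i => if i = 0 then 0
        else if (PySem.List.pyGet? arr 0).getD 0 ≥ i then (PySem.List.pyGet? arr 0).getD 0
        else 10001)) = rowG arr X 0 := by
  rw [rowG]
  apply List.map_congr_left
  intro j hj
  obtain ⟨hj0, hj1⟩ := PySem.List.mem_pyRange_one.mp hj
  by_cases h0 : j = 0
  · subst h0; simp [gSpec_zero]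
  · rw [if_neg h0]
    show _ = gSpec arr 0 j
    rw [gSpec, if_neg (by omega : ¬ j ≤ 0)]

lemma fold_inv (arr : List Int) (X : Int) (n : Nat) (_hn : 1 ≤ n) (hX : 0 ≤ X)
    (hai : ∀ k : Nat, 1 ≤ k → k < n → 1 ≤ X → 0 ≤ (PySem.List.pyGet? arr (k : Int)).getD 0)
    (dp1 : List (List Int)) (hlen : dp1.length = n) (h0 : dp1[0]? = some (rowG arr X 0)) :
    ∀ k : Nat, 1 ≤ k → k ≤ n →
      ((PySem.List.pyRange 1 (k : Int) 1).foldl (solStep arr X) dp1).length = n ∧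
      ((PySem.List.pyRange 1 (k : Int) 1).foldl (solStep arr X) dp1)[k - 1]? =
        some (rowG arr X (k - 1)) := by
  intro k hk1
  induction k, hk1 using Nat.le_induction with
  | base =>
    intro _
    rw [show ((1 : Nat) : Int) = 1 by norm_num, PySem.List.pyRange_one_eq_nil le_rfl]
    simpa using ⟨hlen, h0⟩
  | succ m hm ih =>
    intro hmn
    obtain ⟨ihl, ihget⟩ := ih (by omega)
    have hr : PySem.List.pyRange 1 ((m + 1 : Nat) : Int) 1 =
        PySem.List.pyRange 1 (m : Int) 1 ++ [(m : Int)] := by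
      push_cast
      exact PySem.List.pyRange_one_succ_right (by exact_mod_cast hm)
    rw [hr, List.foldl_append, List.foldl_cons, List.foldl_nil]
    set dpk := (PySem.List.pyRange 1 (m : Int) 1).foldl (solStep arr X) dp1 with hdpk
    simp only [solStep]
    have hprev : (PySem.List.pyGet? dpk ((m : Int) - 1)).getD [] = rowG arr X (m - 1) := by
      rw [show ((m : Int) - 1) = ((m - 1 : Nat) : Int) by omega]
      simp only [PySem.List.pyGet?_natCast]
      rw [ihget]
      rfl
    obtain ⟨m', rfl⟩ : ∃ m', m = m' + 1 := ⟨m - 1, by omega⟩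
    have hcast : ((m' + 1 : Nat) : Int) = (m' : Int) + 1 := by push_cast; ring
    have ha : 1 ≤ X → 0 ≤ (PySem.List.pyGet? arr ((m' : Int) + 1)).getD 0 := by
      intro hx1
      have := hai (m' + 1) (by omega) (by omega) hx1
      rwa [hcast] at this
    rw [hprev]
    simp only [Nat.add_sub_cancel]
    rw [hcast, row_step arr X m' hX ha]
    constructor
    · rw [List.length_set]; exact ihl
    · rw [show ((m' : Int) + 1).toNat = m' + 1 by omega]
      simp [List.getElem?_set, ihl]
      omega
theorem solution_eq (arr : List Int) (N : Int) (X : Int) (hN : 1 ≤ N) (hX : 0 ≤ X)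
    (hc : 1 ≤ X → N ≤ (arr.length : Int) ∧ ∀ a ∈ (arr.take N.toNat).drop 1, 0 ≤ a) :
    solution arr N X = solution_alt arr N X := by
  set n := N.toNat with hn_def
  have hNn : N = (n : Int) := by omega
  have hn1 : 1 ≤ n := by omega
  have hai : ∀ k : Nat, 1 ≤ k → k < n → 1 ≤ X → 0 ≤ (PySem.List.pyGet? arr (k : Int)).getD 0 := by
    intro k hk1 hk2 hx
    obtain ⟨hlen, hpos⟩ := hc hx
    have hkl : k < arr.length := by omega
    simp only [PySem.List.pyGet?_natCast]
    rw [List.getElem?_eq_getElem hkl]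
    simp only [Option.getD_some]
    apply hpos
    have hlt : k - 1 < ((arr.take n).drop 1).length := by
      simp only [List.length_drop, List.length_take]
      omega
    have heq : ((arr.take n).drop 1)[k - 1]'hlt = arr[k] := by
      rw [List.getElem_drop, List.getElem_take]
      congr 1
      omega
    exact heq ▸ List.getElem_mem hlt
  simp only [solution]
  rw [row0_eq]
  have hlen1 : (((PySem.List.pyRange 0 N 1).map
      (fun _ => (PySem.List.pyRange 0 (X + 1) 1).map (fun _ => (0 : Int)))).set 0
        (rowG arr X 0)).length = n := by
    simp [PySem.List.length_pyRange_one]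
    omega
  have h0 : (((PySem.List.pyRange 0 N 1).map
      (fun _ => (PySem.List.pyRange 0 (X + 1) 1).map (fun _ => (0 : Int)))).set 0
        (rowG arr X 0))[0]? = some (rowG arr X 0) := by
    rw [List.getElem?_set]
    simp [PySem.List.length_pyRange_one]
    omega
  obtain ⟨hl, hget⟩ := fold_inv arr X n hn1 hX hai _ hlen1 h0 n hn1 le_rfl
  rw [hNn] at *
  rw [show ((n : Int) - 1) = ((n - 1 : Nat) : Int) by omega]
  simp only [PySem.List.pyGet?_natCast]
  rw [hget]
  simp only [Option.getD_some]
  rw [rowG_get arr X (n - 1) X hX le_rfl, solution_alt_eq_gSpec]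
  rw [show (((n : Int)) - 1).toNat = n - 1 by omega]

-- ===== VERDICT (by name: the statement is the Claim_ definition above) =====
theorem solution_spec : Claim_equal_solution := by
  intro arr N X _ hPre
  obtain ⟨hN, hX, hc⟩ := hPre
  unfold Spec_solution
  exact solution_eq arr N X hN hX hc
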